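-- pv_equiv track=rewrite | github.com/omn0mn0m/Mion | awc/utils.py | remove_and_count_sublist
-- ===== SOURCE A (Python) =====
-- def remove_and_count_sublist(sublist, nested_list):
--     count = 0
--     fixed_list = []
--
--     for i in nested_list:
--         if i == sublist:
--             count += 1
--         else:
--             fixed_list.append(i)
--
--     return fixed_list, count
-- ===== SOURCE B (Python) =====
-- def remove_and_count_sublist(sublist, nested_list):
--     # Segment-splicing: jump from match to match with list.index, copying the
--     # untouched stretches between matches wholesale with slices.
--     fixed_list = []
--     count = 0
--     start = 0
--     while True:
--         try:
--             idx = nested_list.index(sublist, start)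
--         except ValueError:
--             break
--         fixed_list.extend(nested_list[start:idx])
--         count += 1
--         start = idx + 1
--     fixed_list.extend(nested_list[start:])
--     return fixed_list, count
-- ===== Notes on version B (the rewrite author's own statement) =====
-- stated objective: alternative
-- what changed: Replaced A's element-by-element partition loop with a segment-splicing scan: list.index jumps from one match to the next and the untouched stretches between matches are copied wholesale with slices; count is the number of successful index calls.
import Mathlib
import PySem

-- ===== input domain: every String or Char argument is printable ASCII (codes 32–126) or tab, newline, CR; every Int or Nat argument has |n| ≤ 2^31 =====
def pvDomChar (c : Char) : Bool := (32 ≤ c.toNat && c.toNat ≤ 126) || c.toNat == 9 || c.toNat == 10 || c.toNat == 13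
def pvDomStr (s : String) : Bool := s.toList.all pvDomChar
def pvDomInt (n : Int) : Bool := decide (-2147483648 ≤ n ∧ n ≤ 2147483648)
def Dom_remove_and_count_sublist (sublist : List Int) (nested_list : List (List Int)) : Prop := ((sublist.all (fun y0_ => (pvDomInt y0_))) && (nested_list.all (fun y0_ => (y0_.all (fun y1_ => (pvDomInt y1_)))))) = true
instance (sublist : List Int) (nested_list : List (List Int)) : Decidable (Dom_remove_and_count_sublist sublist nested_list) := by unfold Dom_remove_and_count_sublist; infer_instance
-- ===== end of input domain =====

-- B replaces A's element-by-element partition loop by a segment-splicing scan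
-- (list.index from match to match, slices copied wholesale); same value everywhere.

-- ===== PORT A =====
-- A: one loop over nested_list, incrementing count or appending to fixed_list.
def remove_and_count_sublist (sublist : List Int) (nested_list : List (List Int)) : List (List Int) × Int :=
  let st := nested_list.foldl (fun (acc : Int × List (List Int)) i =>
    if i = sublist then (acc.1 + 1, acc.2) else (acc.1, acc.2 ++ [i])) (0, [])
  (st.2, st.1)

-- ===== PORT B =====
-- B's while loop: nested_list.index(sublist, start) is start + (index? of sublist in the
-- suffix from start); ValueError (= none) breaks the loop.
def pvAltLoop (sublist : List Int) (nested_list : List (List Int))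
    (start : Nat) (count : Int) (fixed_list : List (List Int)) : List (List Int) × Int :=
  match h : PySem.List.index? (nested_list.drop start) sublist with
  | none => (fixed_list ++ nested_list.drop start, count)
  | some r =>
      pvAltLoop sublist nested_list (start + r + 1) (count + 1)
        (fixed_list ++ PySem.List.slice nested_list (some (start : Int)) (some ((start : Int) + (r : Int))))
termination_by nested_list.length - start
decreasing_by
  have hr : r < (nested_list.drop start).length := by
    obtain ⟨pre, suf, heq, hlen, _⟩ := (PySem.List.index?_eq_some_iff _ _ _).mp h
    simp [heq, ← hlen]
  simp at hr; omega

def remove_and_count_sublist_alt (sublist : List Int) (nested_list : List (List Int)) : List (List Int) × Int :=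
  pvAltLoop sublist nested_list 0 0 []

-- ===== PRECONDITION & SPEC =====
def Spec_remove_and_count_sublist (sublist : List Int) (nested_list : List (List Int)) (out : List (List Int) × Int) : Prop := out = remove_and_count_sublist_alt sublist nested_list
instance (sublist : List Int) (nested_list : List (List Int)) (out : List (List Int) × Int) : Decidable (Spec_remove_and_count_sublist sublist nested_list out) := by unfold Spec_remove_and_count_sublist; infer_instance

-- ===== CLAIM (what is proved, stated in full; the proofs are below) =====
def Claim_equal_remove_and_count_sublist : Prop := ∀ (sublist : List Int) (nested_list : List (List Int)), Dom_remove_and_count_sublist sublist nested_list → Spec_remove_and_count_sublist sublist nested_list (remove_and_count_sublist sublist nested_list)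

-- ===== LEMMAS AND PROOFS =====
theorem remove_foldl_inv (sublist : List Int) (nested_list : List (List Int))
    (c : Int) (acc : List (List Int)) :
    nested_list.foldl (fun (acc : Int × List (List Int)) i =>
      if i = sublist then (acc.1 + 1, acc.2) else (acc.1, acc.2 ++ [i])) (c, acc)
    = (c + ((nested_list.filter (fun i => i = sublist)).length : Int),
       acc ++ nested_list.filter (fun i => i ≠ sublist)) := by
  induction nested_list generalizing c acc with
  | nil => simp
  | cons h t ih =>
      by_cases hh : h = sublist <;>
        simp [List.foldl, hh, ih, List.filter] <;> ring

theorem pvAltLoop_inv (sublist : List Int) (nested_list : List (List Int))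
    (start : Nat) (count : Int) (fixed_list : List (List Int)) :
    pvAltLoop sublist nested_list start count fixed_list
    = (fixed_list ++ (nested_list.drop start).filter (fun i => i ≠ sublist),
       count + (((nested_list.drop start).filter (fun i => i = sublist)).length : Int)) := by
  induction start, count, fixed_list using pvAltLoop.induct sublist nested_list with
  | case1 start count fixed_list h =>
      rw [pvAltLoop, h]
      have hnm : sublist ∉ nested_list.drop start := (PySem.List.index?_eq_none_iff _ _).mp h
      have h1 : (nested_list.drop start).filter (fun i => i ≠ sublist) = nested_list.drop start := by
        apply List.filter_eq_self.mpr
        intro a ha; simp; exact fun he => hnm (he ▸ ha)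
      have h2 : (nested_list.drop start).filter (fun i => i = sublist) = [] := by
        apply List.filter_eq_nil_iff.mpr
        intro a ha; simp; exact fun he => hnm (he ▸ ha)
      rw [h1, h2]; simp
  | case2 start count fixed_list r h ih =>
      rw [pvAltLoop, h]
      obtain ⟨pre, suf, heq, hlen, hnm⟩ := (PySem.List.index?_eq_some_iff _ _ _).mp h
      have hslice : PySem.List.slice nested_list (some (start : Int)) (some ((start : Int) + (r : Int)))
          = pre := by
        rw [PySem.List.slice_natCast_add, heq, ← hlen, List.take_left]
      have hdrop : nested_list.drop (start + r + 1) = suf := by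
        have : nested_list.drop (start + r + 1) = (nested_list.drop start).drop (r + 1) := by
          rw [List.drop_drop]; ring_nf
        rw [this, heq, ← hlen, List.drop_append]
        simp
      have hpre1 : pre.filter (fun i => i ≠ sublist) = pre := by
        apply List.filter_eq_self.mpr
        intro a ha; simp; exact fun he => hnm (he ▸ ha)
      have hpre2 : pre.filter (fun i => i = sublist) = [] := by
        apply List.filter_eq_nil_iff.mpr
        intro a ha; simp; exact fun he => hnm (he ▸ ha)
      change pvAltLoop sublist nested_list (start + r + 1) (count + 1)
        (fixed_list ++ PySem.List.slice nested_list (some (start : Int)) (some ((start : Int) + (r : Int)))) = _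
      rw [ih, hslice, hdrop, heq]
      simp [List.filter_append, hpre2]
      constructor
      · simpa using hpre1.symm
      · ring

-- ===== VERDICT (by name: the statement is the Claim_ definition above) =====
theorem remove_and_count_sublist_spec : Claim_equal_remove_and_count_sublist := by
  intro sublist nested_list _
  unfold Spec_remove_and_count_sublist remove_and_count_sublist remove_and_count_sublist_alt
  simp [remove_foldl_inv, pvAltLoop_inv]
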